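-- pv_equiv track=rewrite | github.com/mobarakol/Surgical_LLM_Agent | inference.py | group_by_sentence_position
-- ===== SOURCE A (Python) =====
-- def group_by_sentence_position(all_prompts, num_sentences):
--     grouped_sentences = [[] for _ in range(num_sentences)]
--     for prompts in all_prompts:
--         sentences = prompts.split("|")
--         for i in range(num_sentences):
--             if i < len(sentences):
--                 grouped_sentences[i].append(sentences[i])
--             else:
--                 grouped_sentences[i].append("")
--     return grouped_sentences
-- ===== SOURCE B (Python) =====
-- def group_by_sentence_position(all_prompts, num_sentences):
--     # Flat row-major buffer: pack every prompt's padded/truncated row into one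
--     # 1-D list, then gather column i by index arithmetic flat[j*n+i].
--     n = max(num_sentences, 0)
--     flat = []
--     for p in all_prompts:
--         s = p.split("|")[:n]
--         flat += s + [""] * (n - len(s))
--     m = len(all_prompts)
--     return [[flat[j * n + i] for j in range(m)] for i in range(n)]
-- ===== Notes on version B (the rewrite author's own statement) =====
-- stated objective: alternative
-- what changed: Replaces A's nested-loop accumulation into per-position bucket lists by packing every padded/truncated row into a single flat row-major buffer and then gathering each column with index arithmetic flat[j*n+i].
import Mathlib
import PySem

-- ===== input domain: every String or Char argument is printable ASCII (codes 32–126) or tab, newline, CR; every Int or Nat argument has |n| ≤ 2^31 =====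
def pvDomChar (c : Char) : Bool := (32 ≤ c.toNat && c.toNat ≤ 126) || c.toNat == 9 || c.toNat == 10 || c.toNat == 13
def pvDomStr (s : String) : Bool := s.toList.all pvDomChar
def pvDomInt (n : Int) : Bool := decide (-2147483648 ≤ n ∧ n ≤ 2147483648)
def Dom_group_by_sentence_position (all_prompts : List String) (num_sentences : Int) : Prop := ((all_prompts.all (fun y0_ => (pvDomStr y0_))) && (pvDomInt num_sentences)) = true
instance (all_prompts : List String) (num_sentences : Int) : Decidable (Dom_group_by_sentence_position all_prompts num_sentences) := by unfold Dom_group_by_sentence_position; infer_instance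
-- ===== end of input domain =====

-- B replaces A's nested-loop bucket accumulation by packing padded rows into one flat row-major buffer and gathering columns by index arithmetic (objective: alternative; same asymptotic cost).


-- ===== PORT A =====
-- literal port of A: grouped_sentences[i] is read with pyGetD and written back with pySetD
-- (prompts.split("|") = Str.split?, total here since the separator "|" is nonempty)
def group_by_sentence_position (all_prompts : List String) (num_sentences : Int) : List (List String) :=
  let grouped0 := (PySem.List.pyRange 0 num_sentences 1).map (fun _ => ([] : List String))
  all_prompts.foldl (fun grouped prompts =>
    let sentences := (PySem.Str.split? prompts "|").getD []
    (PySem.List.pyRange 0 num_sentences 1).foldl (fun g i =>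
      if i < (sentences.length : Int) then
        PySem.List.pySetD g i (PySem.List.pyGetD g i [] ++ [PySem.List.pyGetD sentences i ""])
      else
        PySem.List.pySetD g i (PySem.List.pyGetD g i [] ++ [""])) grouped) grouped0

-- ===== PORT B =====
-- literal port of Source B: build the flat row-major buffer, then gather flat[j*n+i];
-- every access j*n+i is in range, so flat[j*n+i] is pyGetD (total under that bound)
def group_by_sentence_position_alt (all_prompts : List String) (num_sentences : Int) : List (List String) :=
  let n : Int := max num_sentences 0
  let flat := all_prompts.foldl (fun flat p =>
    let s := PySem.List.slice ((PySem.Str.split? p "|").getD []) none (some n)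
    flat ++ (s ++ List.replicate (n.toNat - s.length) "")) []
  let m : Int := (all_prompts.length : Int)
  (PySem.List.pyRange 0 n 1).map (fun i =>
    (PySem.List.pyRange 0 m 1).map (fun j => PySem.List.pyGetD flat (j * n + i) ""))

-- ===== PRECONDITION & SPEC =====
def Spec_group_by_sentence_position (all_prompts : List String) (num_sentences : Int) (out : List (List String)) : Prop := out = group_by_sentence_position_alt all_prompts num_sentences
instance (all_prompts : List String) (num_sentences : Int) (out : List (List String)) : Decidable (Spec_group_by_sentence_position all_prompts num_sentences out) := by unfold Spec_group_by_sentence_position; infer_instance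

-- ===== CLAIM (what is proved, stated in full; the proofs are below) =====
def Claim_equal_group_by_sentence_position : Prop := ∀ (all_prompts : List String) (num_sentences : Int), Dom_group_by_sentence_position all_prompts num_sentences → Spec_group_by_sentence_position all_prompts num_sentences (group_by_sentence_position all_prompts num_sentences)

-- ===== LEMMAS AND PROOFS =====

-- abbreviation used only by the proofs: the k-th sentence of p, "" past the end
def pvSent (p : String) (k : Nat) : String := ((PySem.Str.split? p "|").getD []).getD k ""

-- the padded/truncated row Source B builds for p, with length forced to N
def pvRow (p : String) (N : Nat) : List String :=
  let s := ((PySem.Str.split? p "|").getD []).take N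
  s ++ List.replicate (N - s.length) ""

theorem pvRow_length (p : String) (N : Nat) : (pvRow p N).length = N := by
  unfold pvRow
  simp

theorem pvRow_getD (p : String) (N i : Nat) (hi : i < N) :
    (pvRow p N).getD i "" = pvSent p i := by
  unfold pvRow pvSent
  set s := (PySem.Str.split? p "|").getD [] with hs
  by_cases hc : i < s.length
  · rw [List.getD_eq_getElem?_getD, List.getElem?_append_left (by simp; omega),
        List.getElem?_take, if_pos hi, List.getD_eq_getElem?_getD]
  · have h1 : (s.take N).length ≤ i := by simp; omega
    rw [List.getD_eq_getElem?_getD, List.getElem?_append_right h1, List.getElem?_replicate,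
        if_pos (by simp at h1 ⊢; omega), List.getD_eq_getElem?_getD,
        List.getElem?_eq_none (by omega)]
    rfl

theorem pv_getD_map_range (g : List (List String)) :
    (List.range g.length).map (fun k => g.getD k []) = g := by
  apply List.ext_getElem
  · simp
  · intro i h1 h2
    simp [List.getD_eq_getElem?_getD, h2]

theorem pv_getD_map_range' (n k : Nat) (f : Nat → List String) (hk : k < n) :
    (((List.range n).map f).getD k []) = f k := by
  rw [List.getD_eq_getElem?_getD]
  simp [hk]

theorem pv_innerLem (s : List String) (m : Nat) (g : List (List String)) (hm : m ≤ g.length) :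
    (PySem.List.pyRange 0 (m : Int) 1).foldl (fun g i =>
      if i < (s.length : Int) then
        PySem.List.pySetD g i (PySem.List.pyGetD g i [] ++ [PySem.List.pyGetD s i ""])
      else
        PySem.List.pySetD g i (PySem.List.pyGetD g i [] ++ [""])) g
    = (List.range g.length).map (fun k => if k < m then g.getD k [] ++ [s.getD k ""] else g.getD k []) := by
  induction m with
  | zero =>
    rw [PySem.List.pyRange_one_eq_nil (by omega)]
    simp only [List.foldl_nil, Nat.not_lt_zero, if_false]
    exact (pv_getD_map_range g).symm
  | succ m ih =>
    have hm' : m ≤ g.length := by omega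
    rw [show ((m + 1 : Nat) : Int) = (m : Int) + 1 by push_cast; ring,
        PySem.List.pyRange_one_succ_right (by omega), List.foldl_append, ih hm']
    set X := (List.range g.length).map (fun k => if k < m then g.getD k [] ++ [s.getD k ""] else g.getD k []) with hX
    have hXlen : X.length = g.length := by simp [hX]
    have hXm : X.getD m [] = g.getD m [] := by
      rw [hX, pv_getD_map_range' _ _ _ (by omega)]; simp
    have hval : (if (m:Int) < (s.length : Int) then PySem.List.pyGetD s (m:Int) "" else "") = s.getD m "" := by
      split_ifs with hlt
      · rw [PySem.List.pyGetD_natCast]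
      · rw [List.getD_eq_getElem?_getD, List.getElem?_eq_none (by omega)]
        rfl
    have hcore : List.foldl (fun g i =>
        if i < (s.length : Int) then
          PySem.List.pySetD g i (PySem.List.pyGetD g i [] ++ [PySem.List.pyGetD s i ""])
        else
          PySem.List.pySetD g i (PySem.List.pyGetD g i [] ++ [""])) X [(m : Int)]
        = X.set m (g.getD m [] ++ [s.getD m ""]) := by
      simp only [List.foldl_cons, List.foldl_nil]
      rw [← hval]
      split_ifs with hlt <;>
        rw [PySem.List.pySetD_natCast, PySem.List.pyGetD_natCast, hXm]
    rw [hcore]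
    apply List.ext_getElem
    · simp [hX]
    · intro j hj1 hj2
      have hj : j < g.length := by simpa using hj2
      simp only [hX, List.getElem_set, List.getElem_map, List.getElem_range]
      by_cases hjm : m = j
      · subst hjm
        rw [if_pos rfl, if_pos (by omega)]
      · rw [if_neg hjm]
        by_cases h1 : j < m
        · rw [if_pos h1, if_pos (by omega)]
        · rw [if_neg h1, if_neg (by omega)]

-- A's outer loop: each processed prompt appends one entry to every bucket
theorem pv_outerLem (ps : List String) (N : Nat) (g : List (List String)) (hg : g.length = N) :
    ps.foldl (fun grouped prompts =>
      let sentences := (PySem.Str.split? prompts "|").getD []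
      (PySem.List.pyRange 0 (N : Int) 1).foldl (fun g i =>
        if i < (sentences.length : Int) then
          PySem.List.pySetD g i (PySem.List.pyGetD g i [] ++ [PySem.List.pyGetD sentences i ""])
        else
          PySem.List.pySetD g i (PySem.List.pyGetD g i [] ++ [""])) grouped) g
    = (List.range N).map (fun k => g.getD k [] ++ ps.map (fun p => pvSent p k)) := by
  induction ps generalizing g with
  | nil =>
    simp only [List.foldl_nil, List.map_nil, List.append_nil]
    rw [← hg, pv_getD_map_range]
  | cons p ps ih =>
    simp only [List.foldl_cons]
    rw [pv_innerLem _ N g (by omega), hg]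
    have hmid : (List.range N).map (fun k => if k < N then g.getD k [] ++ [((PySem.Str.split? p "|").getD []).getD k ""] else g.getD k [])
        = (List.range N).map (fun k => g.getD k [] ++ [pvSent p k]) := by
      apply List.map_congr_left
      intro k hk
      rw [List.mem_range] at hk
      rw [if_pos hk]
      rfl
    rw [hmid, ih _ (by simp)]
    apply List.map_congr_left
    intro k hk
    rw [List.mem_range] at hk
    rw [pv_getD_map_range' _ _ _ hk]
    simp [List.append_assoc]

-- B's flat buffer is the flatMap of the rows
theorem pv_flat_eq (ps : List String) (N : Nat) (acc : List String) :
    ps.foldl (fun flat p =>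
      let s := PySem.List.slice ((PySem.Str.split? p "|").getD []) none (some (N : Int))
      flat ++ (s ++ List.replicate ((N : Int).toNat - s.length) "")) acc
    = acc ++ ps.flatMap (fun p => pvRow p N) := by
  induction ps generalizing acc with
  | nil => simp
  | cons p ps ih =>
    simp only [List.foldl_cons, List.flatMap_cons]
    rw [ih]
    have : PySem.List.slice ((PySem.Str.split? p "|").getD []) none (some (N : Int))
        = ((PySem.Str.split? p "|").getD []).take N := PySem.List.slice_to_natCast _ _
    rw [this]
    simp only [Int.toNat_natCast, pvRow]
    rw [List.append_assoc]

-- reading position j*N+i of the flat buffer hits row j at offset i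
theorem pv_flat_getD (rows : List (List String)) (N : Nat) (hN : ∀ r ∈ rows, r.length = N)
    (j i : Nat) (hj : j < rows.length) (hi : i < N) :
    (rows.flatMap id).getD (j * N + i) "" = (rows.getD j []).getD i "" := by
  induction rows generalizing j with
  | nil => simp at hj
  | cons r rs ih =>
    have hr : r.length = N := hN r (by simp)
    cases j with
    | zero =>
      simp only [Nat.zero_mul, Nat.zero_add, List.flatMap_cons, id]
      rw [List.getD_eq_getElem?_getD, List.getElem?_append_left (by omega),
          ← List.getD_eq_getElem?_getD]
      simp
    | succ j =>
      have hj' : j < rs.length := by simpa using hj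
      have hidx : (j + 1) * N + i = r.length + (j * N + i) := by rw [hr]; ring
      simp only [List.flatMap_cons, id]
      rw [List.getD_eq_getElem?_getD, hidx, List.getElem?_append_right (by omega),
          Nat.add_sub_cancel_left, ← List.getD_eq_getElem?_getD,
          ih (fun r hr => hN r (by simp [hr])) j hj']
      simp

theorem pv_pyRange_toNat (n : Int) :
    PySem.List.pyRange 0 n 1 = PySem.List.pyRange 0 (n.toNat : Int) 1 := by
  rcases le_or_gt 0 n with h | h
  · rw [Int.toNat_of_nonneg h]
  · rw [PySem.List.pyRange_one_eq_nil (by omega), PySem.List.pyRange_one_eq_nil (by omega)]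

theorem pv_pyRange_nat_map (N : Nat) (f : Int → List String) :
    (PySem.List.pyRange 0 (N : Int) 1).map f = (List.range N).map (fun k : Nat => f (k : Int)) := by
  rw [PySem.List.pyRange_one]
  simp only [Int.sub_zero, Int.toNat_natCast, List.map_map]
  apply List.map_congr_left
  intro k _
  simp

-- ===== VERDICT (by name: the statement is the Claim_ definition above) =====
theorem group_by_sentence_position_spec : Claim_equal_group_by_sentence_position := by
  intro all_prompts num_sentences _
  unfold Spec_group_by_sentence_position group_by_sentence_position group_by_sentence_position_alt
  set N := num_sentences.toNat with hN
  have hmax : max num_sentences 0 = (N : Int) := by omega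
  simp only [hmax, pv_pyRange_toNat num_sentences, ← hN]
  -- A's side
  have hlen0 : ((PySem.List.pyRange 0 (N : Int) 1).map (fun _ => ([] : List String))).length = N := by
    simp [PySem.List.length_pyRange_one]
  rw [pv_outerLem all_prompts N _ hlen0]
  have hA : (List.range N).map (fun k => ((PySem.List.pyRange 0 (N : Int) 1).map (fun _ => ([] : List String))).getD k [] ++ all_prompts.map (fun p => pvSent p k))
      = (List.range N).map (fun k => all_prompts.map (fun p => pvSent p k)) := by
    apply List.map_congr_left
    intro k hk
    rw [List.mem_range] at hk
    rw [List.getD_eq_getElem?_getD, List.getElem?_eq_getElem (by rw [hlen0]; exact hk)]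
    simp
  rw [hA]
  -- B's side
  rw [pv_flat_eq all_prompts N []]
  have hflat : all_prompts.flatMap (fun p => pvRow p N)
      = (all_prompts.map (fun p => pvRow p N)).flatMap id := by
    simp [List.flatMap_def, List.map_map]
  rw [List.nil_append, hflat, pv_pyRange_nat_map]
  apply List.map_congr_left
  intro i hi
  rw [List.mem_range] at hi
  apply List.ext_getElem
  · simp [PySem.List.length_pyRange_one]
  · intro j hj1 hj2
    have hjlen : j < all_prompts.length := by simpa using hj1
    simp only [List.getElem_map, PySem.List.getElem_pyRange_one]
    have hcast : (0 + (j : Int)) * (N : Int) + (i : Int) = ((j * N + i : Nat) : Int) := by push_cast; ring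
    rw [hcast, PySem.List.pyGetD_natCast,
        pv_flat_getD _ N (by
          intro r hr
          rw [List.mem_map] at hr
          obtain ⟨q, _, rfl⟩ := hr
          exact pvRow_length q N) j i (by simpa using hjlen) hi]
    have hmap : (List.map (fun p => pvRow p N) all_prompts).getD j [] = pvRow all_prompts[j] N := by
      rw [List.getD_eq_getElem?_getD, List.getElem?_map, List.getElem?_eq_getElem hjlen]
      rfl
    rw [hmap, pvRow_getD _ _ _ hi]
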